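-- pv_equiv track=rewrite | github.com/EjnarRaidriar/Cryptography | lab code/lab 1/cesar's_code.py | cryptogram
-- ===== SOURCE A (Python) =====
-- alphabet_string = 'ABCDEFGHIJKLMNOPQRSTUVWXYZ'
--
-- def cryptogram(crypt: str) -> str:
--     alph = list(alphabet_string)
--     crypt = list(crypt.upper())
--     e = list()
--     for ch in crypt:
--         if ch not in e:
--             e.append(ch)
--     for ch in list(alph):
--         if ch in e:
--             alph.remove(ch)
--     e += alph
--     return "".join(e)
-- ===== SOURCE B (Python) =====
-- alphabet_string = 'ABCDEFGHIJKLMNOPQRSTUVWXYZ'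
--
-- def cryptogram(crypt: str) -> str:
--     # one pass: order-preserving dedup of the merged sequence
--     return "".join(dict.fromkeys(crypt.upper() + alphabet_string))
-- ===== Notes on version B (the rewrite author's own statement) =====
-- stated objective: simpler
-- what changed: Replaces A's two phases (list-membership dedup loop over crypt, then a scan-and-remove loop over the alphabet, then concatenation) with a single order-preserving dedup of the merged string crypt.upper() + alphabet_string via dict.fromkeys (O(1) hash membership instead of O(n) list scans).
import Mathlib
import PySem

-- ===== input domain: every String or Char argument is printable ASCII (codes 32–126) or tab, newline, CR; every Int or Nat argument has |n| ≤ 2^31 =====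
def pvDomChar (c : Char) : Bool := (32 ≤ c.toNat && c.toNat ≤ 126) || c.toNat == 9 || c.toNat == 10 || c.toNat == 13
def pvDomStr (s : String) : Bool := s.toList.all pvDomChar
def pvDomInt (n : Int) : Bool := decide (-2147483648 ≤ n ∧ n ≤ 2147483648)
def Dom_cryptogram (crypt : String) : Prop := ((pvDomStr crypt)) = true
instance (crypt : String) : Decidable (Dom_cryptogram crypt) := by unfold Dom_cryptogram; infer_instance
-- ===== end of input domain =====

-- B replaces A's two phases (dedup crypt, then scan-and-remove over the alphabet) by one
-- order-preserving dedup of the merged sequence crypt.upper() + alphabet_string (simpler).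

def alphabetChars : List Char := "ABCDEFGHIJKLMNOPQRSTUVWXYZ".toList

-- ===== PORT A =====
def cryptogram (crypt : String) : String :=
  let alph := alphabetChars
  let cryptL := (PySem.Str.upper crypt).toList
  -- first loop: for ch in crypt: if ch not in e: e.append(ch)
  let e := cryptL.foldl (fun e ch => if e.contains ch then e else e ++ [ch]) []
  -- second loop: for ch in list(alph): if ch in e: alph.remove(ch)
  -- alph.remove never raises here (each alphabet letter occurs once and is removed at most once),
  -- so the `.getD acc` branch is unreachable.
  let alph2 := alph.foldl
    (fun acc ch => if e.contains ch then (PySem.List.remove? acc ch).getD acc else acc) alph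
  String.mk (e ++ alph2)

-- ===== PORT B =====
def cryptogram_alt (crypt : String) : String :=
  -- "".join(dict.fromkeys(crypt.upper() + alphabet_string))
  String.mk (PySem.List.dedup ((PySem.Str.upper crypt).toList ++ alphabetChars))

-- ===== PRECONDITION & SPEC =====
def Spec_cryptogram (crypt : String) (out : String) : Prop := out = cryptogram_alt crypt
instance (crypt : String) (out : String) : Decidable (Spec_cryptogram crypt out) := by unfold Spec_cryptogram; infer_instance

-- ===== CLAIM (what is proved, stated in full; the proofs are below) =====
def Claim_equal_cryptogram : Prop := ∀ (crypt : String), Dom_cryptogram crypt → Spec_cryptogram crypt (cryptogram crypt)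

-- ===== LEMMAS AND PROOFS =====

-- Pull a head element not removed by the loop body out of the removal fold.
lemma removeFold_cons (e : List Char) (a : Char) :
    ∀ (t s : List Char), a ∉ t →
      t.foldl (fun acc ch => if e.contains ch then (PySem.List.remove? acc ch).getD acc else acc) (a :: s)
      = a :: t.foldl (fun acc ch => if e.contains ch then (PySem.List.remove? acc ch).getD acc else acc) s := by
  intro t
  induction t with
  | nil => intro s _; rfl
  | cons c t ih =>
      intro s ha
      have hne : c ≠ a := by
        intro h; exact ha (by simp [h])
      have ha' : a ∉ t := fun h => ha (List.mem_cons_of_mem _ h)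
      simp only [List.foldl_cons]
      by_cases hc : e.contains c
      · have hrem : (PySem.List.remove? (a :: s) c).getD (a :: s)
            = a :: (PySem.List.remove? s c).getD s := by
          rw [PySem.List.remove?_cons_of_ne s (Ne.symm hne)]
          cases h : PySem.List.remove? s c <;> simp
        rw [if_pos hc, if_pos hc, hrem, ih _ ha']
      · rw [if_neg hc, if_neg hc, ih _ ha']

-- A's scan-and-remove loop over a duplicate-free list leaves exactly the letters not in e.
lemma removeFold_eq_filter (e : List Char) :
    ∀ (l : List Char), l.Nodup →
      l.foldl (fun acc ch => if e.contains ch then (PySem.List.remove? acc ch).getD acc else acc) l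
      = l.filter (fun c => !(e.contains c)) := by
  intro l
  induction l with
  | nil => intro _; rfl
  | cons a t ih =>
      intro hnd
      have ha : a ∉ t := (List.nodup_cons.mp hnd).1
      have ht : t.Nodup := (List.nodup_cons.mp hnd).2
      simp only [List.foldl_cons, List.filter_cons]
      by_cases hc : e.contains a
      · rw [if_pos hc, PySem.List.remove?_cons_self]
        simp only [Option.getD_some]
        rw [ih ht]
        have hae : a ∈ e := by simpa using hc
        simp [hae]
      · rw [if_neg hc, removeFold_cons e a t t ha, ih ht]
        have hae : a ∉ e := by simpa using hc
        simp [hae]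

lemma alphabetChars_nodup : alphabetChars.Nodup := by decide

-- ===== VERDICT (by name: the statement is the Claim_ definition above) =====
theorem cryptogram_spec : Claim_equal_cryptogram := by
  intro crypt _
  unfold Spec_cryptogram
  have hadd : (fun (e : List Char) ch => if e.contains ch then e else e ++ [ch])
      = PySem.Set.add := by
    funext s x; simp [PySem.Set.add]
  simp only [cryptogram, cryptogram_alt, hadd, ← PySem.Set.ofList_eq_foldl]
  rw [removeFold_eq_filter _ _ alphabetChars_nodup]
  rw [PySem.List.dedup_eq_ofList, PySem.Set.ofList_append,
      PySem.Set.update_eq_append_filter,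
      PySem.Set.ofList_eq_self_of_nodup _ alphabetChars_nodup]
  rfl
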